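-- pv_equiv track=rewrite | github.com/SuffolkLITLab/docassemble-MA209AProtectiveOrder | docassemble/MA209AProtectiveOrder/care_and_custody.py | filter_letters
-- ===== SOURCE A (Python) =====
-- def filter_letters(letter_strings):
--   """Used to take a list of letters like ["A","ABC","AB"] and filter out any duplicate letters."""
--   # There is probably a cute one liner, but this is easy to follow and
--   # probably same speed
--   unique_letters = set()
--   if isinstance(letter_strings, str):
--     letter_strings = [letter_strings]
--   for string in letter_strings:
--     if string: # Catch possible None values
--       for letter in string:
--         unique_letters.add(letter)
--   try:
--     retval = ''.join(sorted(unique_letters))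
--   except:
--     retval = ''
--   return retval
-- ===== SOURCE B (Python) =====
-- def filter_letters(letter_strings):
--   """Used to take a list of letters like ["A","ABC","AB"] and filter out any duplicate letters."""
--   if isinstance(letter_strings, str):
--     letter_strings = [letter_strings]
--   chars = []
--   for string in letter_strings:
--     if string:  # Catch possible None values
--       chars.extend(string)
--   try:
--     chars.sort()
--     out = []
--     for c in chars:
--       if not out or out[-1] != c:
--         out.append(c)
--     retval = ''.join(out)
--   except:
--     retval = ''
--   return retval
-- ===== Notes on version B (the rewrite author's own statement) =====
-- stated objective: alternative
-- what changed: Replaces hash-set deduplication followed by sorting with collecting all characters into a flat list, sorting it, and keeping only the first of each run of equal adjacent characters.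
import Mathlib
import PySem

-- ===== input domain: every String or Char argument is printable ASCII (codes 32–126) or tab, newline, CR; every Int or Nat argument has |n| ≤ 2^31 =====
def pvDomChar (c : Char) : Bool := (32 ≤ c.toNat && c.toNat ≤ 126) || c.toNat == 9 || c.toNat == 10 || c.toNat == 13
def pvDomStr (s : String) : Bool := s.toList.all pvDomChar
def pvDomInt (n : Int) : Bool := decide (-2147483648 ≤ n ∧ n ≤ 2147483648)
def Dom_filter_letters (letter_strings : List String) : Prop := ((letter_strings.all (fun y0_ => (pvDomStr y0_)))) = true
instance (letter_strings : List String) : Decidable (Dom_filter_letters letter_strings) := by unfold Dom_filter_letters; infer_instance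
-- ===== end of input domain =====

-- B replaces A's hash-set dedup with sort-then-adjacent-dedup: same result, alternative algorithm.
-- (The isinstance(…, str) branch cannot fire for a List String argument; A's try/except around
-- sorting/joining characters can never raise, so both ports are total.)

-- ===== PORT A =====
def filter_letters (letter_strings : List String) : String :=
  -- unique_letters = set(); for string in …: if string: for letter in string: add
  let unique_letters : PySem.Set Char :=
    letter_strings.foldl
      (fun acc s => if s.toList ≠ [] then s.toList.foldl (fun u c => PySem.Set.add u c) acc else acc)
      PySem.Set.empty
  -- retval = ''.join(sorted(unique_letters))  (joining sorted characters; cannot raise)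
  String.ofList (PySem.List.sorted unique_letters (fun x => x) false)

-- ===== PORT B =====
def filter_letters_alt (letter_strings : List String) : String :=
  -- chars = []; for string in …: if string: chars.extend(string)
  let chars : List Char :=
    letter_strings.foldl (fun acc s => if s.toList ≠ [] then acc ++ s.toList else acc) []
  -- chars.sort()
  let sortedChars := PySem.List.sorted chars (fun x => x) false
  -- out = []; for c in chars: if not out or out[-1] != c: out.append(c)
  let out := sortedChars.foldl (fun out c => if out.getLast? = some c then out else out ++ [c]) []
  -- ''.join(out)  (cannot raise)
  String.ofList out

-- ===== PRECONDITION & SPEC =====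
def Spec_filter_letters (letter_strings : List String) (out : String) : Prop := out = filter_letters_alt letter_strings
instance (letter_strings : List String) (out : String) : Decidable (Spec_filter_letters letter_strings out) := by unfold Spec_filter_letters; infer_instance

-- ===== CLAIM (what is proved, stated in full; the proofs are below) =====
def Claim_equal_filter_letters : Prop := ∀ (letter_strings : List String), Dom_filter_letters letter_strings → Spec_filter_letters letter_strings (filter_letters letter_strings)

-- ===== LEMMAS AND PROOFS =====

-- A's set-building fold equals set(…) of B's flat character list.
theorem foldA_eq_ofList (ls : List String) : ∀ L : List Char,
    ls.foldl
      (fun acc s => if s.toList ≠ [] then s.toList.foldl (fun u c => PySem.Set.add u c) acc else acc)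
      (PySem.Set.ofList L)
    = PySem.Set.ofList (ls.foldl (fun acc s => if s.toList ≠ [] then acc ++ s.toList else acc) L) := by
  induction ls with
  | nil => intro L; rfl
  | cons s t ih =>
    intro L
    simp only [List.foldl_cons]
    by_cases h : s.toList = []
    · rw [if_neg (not_not_intro h), if_neg (not_not_intro h), ih]
    · rw [if_pos h, if_pos h]
      have key : PySem.Set.ofList (L ++ s.toList)
          = s.toList.foldl (fun u c => PySem.Set.add u c) (PySem.Set.ofList L) := by
        simp [PySem.Set.ofList_eq_foldl, List.foldl_append]
      rw [← key, ih]

-- in a strictly increasing list every element is ≤ the last one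
theorem le_getLast?_of_pairwise_lt : ∀ (acc : List Char) (m : Char),
    acc.Pairwise (· < ·) → acc.getLast? = some m → ∀ a ∈ acc, a ≤ m := by
  intro acc
  induction acc with
  | nil => intro m _ hm; simp at hm
  | cons x xs ih =>
    intro m hp hm a ha
    rcases List.pairwise_cons.mp hp with ⟨hx, hxs⟩
    cases hxs' : xs with
    | nil =>
      subst hxs'
      simp at hm ha
      exact le_of_eq (ha.trans hm)
    | cons y ys =>
      have hm' : xs.getLast? = some m := by
        rw [hxs'] at hm ⊢
        simpa [List.getLast?_cons_cons] using hm
      rcases List.mem_cons.mp ha with rfl | ha'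
      · have hy : m ∈ xs := List.mem_of_getLast? hm'
        exact le_of_lt (hx m hy)
      · exact ih m hxs hm' a ha'

-- the adjacent-dedup fold on a ≤-sorted list: result is strictly increasing with the union membership
theorem foldDedup_spec : ∀ (l acc : List Char),
    l.Pairwise (· ≤ ·) → acc.Pairwise (· < ·) → (∀ a ∈ acc, ∀ b ∈ l, a ≤ b) →
    (l.foldl (fun out c => if out.getLast? = some c then out else out ++ [c]) acc).Pairwise (· < ·)
    ∧ ∀ x, x ∈ l.foldl (fun out c => if out.getLast? = some c then out else out ++ [c]) acc
          ↔ x ∈ acc ∨ x ∈ l := by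
  intro l
  induction l with
  | nil => intro acc _ hacc _; simpa using hacc
  | cons c rest ih =>
    intro acc hl hacc hle
    rcases List.pairwise_cons.mp hl with ⟨hc, hrest⟩
    simp only [List.foldl_cons]
    by_cases hlast : acc.getLast? = some c
    · have hcin : c ∈ acc := List.mem_of_getLast? hlast
      have h := ih acc hrest hacc (fun a ha b hb => hle a ha b (List.mem_cons_of_mem _ hb))
      rw [if_pos hlast]
      refine ⟨h.1, fun x => ?_⟩
      rw [h.2 x]
      constructor
      · rintro (hx | hx)
        · exact Or.inl hx
        · exact Or.inr (List.mem_cons_of_mem _ hx)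
      · rintro (hx | hx)
        · exact Or.inl hx
        · rcases List.mem_cons.mp hx with rfl | hx'
          · exact Or.inl hcin
          · exact Or.inr hx'
    · rw [if_neg hlast]
      have hacc' : (acc ++ [c]).Pairwise (· < ·) := by
        rw [List.pairwise_append]
        refine ⟨hacc, List.pairwise_singleton _ _, ?_⟩
        intro a ha b hb
        rcases List.mem_singleton.mp hb with rfl
        have hle' : a ≤ b := hle a ha b (List.mem_cons_self ..)
        rcases lt_or_eq_of_le hle' with hlt | rfl
        · exact hlt
        · -- a = c ∈ acc: then getLast? acc = some m with a ≤ m ≤ c, m ≠ c contradiction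
          cases hml : acc.getLast? with
          | none => simp [List.getLast?_eq_none_iff.mp hml] at ha
          | some m =>
            have h1 : a ≤ m := le_getLast?_of_pairwise_lt acc m hacc hml a ha
            have h2 : m ∈ acc := List.mem_of_getLast? hml
            have h3 : m ≤ a := hle m h2 a (List.mem_cons_self ..)
            have : m = a := le_antisymm h3 h1
            exact absurd (this ▸ hml) hlast
      have hle'' : ∀ a ∈ acc ++ [c], ∀ b ∈ rest, a ≤ b := by
        intro a ha b hb
        rcases List.mem_append.mp ha with ha' | ha'
        · exact hle a ha' b (List.mem_cons_of_mem _ hb)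
        · rcases List.mem_singleton.mp ha' with rfl
          exact hc b hb
      have h := ih (acc ++ [c]) hrest hacc' hle''
      refine ⟨h.1, fun x => ?_⟩
      rw [h.2 x]
      simp [List.mem_append, List.mem_cons, or_assoc]

-- ===== VERDICT (by name: the statement is the Claim_ definition above) =====
theorem filter_letters_spec : Claim_equal_filter_letters := by
  intro ls _
  unfold Spec_filter_letters filter_letters filter_letters_alt
  simp only []
  set chars := ls.foldl (fun acc s => if s.toList ≠ [] then acc ++ s.toList else acc) [] with hchars
  have hA : ls.foldl
      (fun acc s => if s.toList ≠ [] then s.toList.foldl (fun u c => PySem.Set.add u c) acc else acc)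
      PySem.Set.empty = PySem.Set.ofList chars := by
    exact foldA_eq_ofList ls []
  rw [hA]
  set sc := PySem.List.sorted chars (fun x => x) false with hsc
  have hpairs : sc.Pairwise (· ≤ ·) := by
    simpa using PySem.List.sorted_pairwise chars (fun x => x)
  have h := foldDedup_spec sc [] hpairs (List.Pairwise.nil) (by intro a ha; simp at ha)
  set R := sc.foldl (fun out c => if out.getLast? = some c then out else out ++ [c]) [] with hR
  have hnod : R.Nodup := h.1.imp ne_of_lt
  have hperm : R.Perm (PySem.Set.ofList chars) := by
    rw [List.perm_ext_iff_of_nodup hnod (PySem.Set.nodup_ofList chars)]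
    intro a
    rw [h.2 a, PySem.Set.mem_ofList, hsc, PySem.List.mem_sorted]
    simp
  have : PySem.List.sorted (PySem.Set.ofList chars) (fun x => x) false = R :=
    PySem.List.sorted_eq_of_perm_of_pairwise_lt (PySem.Set.ofList chars) R (fun x => x) hperm h.1
  rw [this]
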